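-- pv_equiv track=rewrite | github.com/redenmer/18347-CPSC_323_Final_Project | part_3/part3_code.py | get_next_chunk
-- ===== SOURCE A (Python) =====
-- reserved = {"program", "end", "var", "begin", "integer", "print", "LB"}
--
-- def get_next_chunk(input_string, index):
--     while index < len(input_string) and input_string[index].isspace():
--         index += 1  # Skip whitespace
--
--     if index >= len(input_string):
--         return "$", index  # End of input
--
--     if input_string.startswith('"value=",', index):
--         return '"value=",', index + len('"value=",')
--
--         # If no match, continue with existing logic
--     for length in range(len(input_string) - index, 0, -1):
--         possible_chunk = input_string[index:index + length]
--         if possible_chunk in reserved: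
--             return possible_chunk, index + length  # Return reserved word
--
--     return input_string[index], index + 1  # Return the next character as a single token
-- ===== SOURCE B (Python) =====
-- # B: instead of scanning all prefix lengths descending, scan the fixed reserved-word set
-- # and keep the longest word that matches at the index (idiomatic, word-set driven).
-- reserved_words = ("program", "end", "var", "begin", "integer", "print", "LB")
--
-- def get_next_chunk(input_string, index):
--     while index < len(input_string) and input_string[index].isspace():
--         index += 1  # Skip whitespace
--
--     if index >= len(input_string):
--         return "$", index  # End of input
--
--     if input_string.startswith('"value=",', index):
--         return '"value=",', index + len('"value=",')
--
--     best = None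
--     for word in reserved_words:
--         if input_string.startswith(word, index) and (best is None or len(word) > len(best)):
--             best = word
--     if best is not None:
--         return best, index + len(best)
--     return input_string[index], index + 1
-- ===== Notes on version B (the rewrite author's own statement) =====
-- stated objective: faster
-- what changed: A tries every prefix length from len(input)-index down to 1 and tests each slice for set membership; B instead iterates once over the seven fixed reserved words, keeping the longest one that matches at the index with startswith, so the search is driven by the word set rather than by all prefix lengths.
-- outside the precondition, e.g. on get_next_chunk('xxvar', -3): A returns ('var', 5), B returns ('var', 0)
import Mathlib
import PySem

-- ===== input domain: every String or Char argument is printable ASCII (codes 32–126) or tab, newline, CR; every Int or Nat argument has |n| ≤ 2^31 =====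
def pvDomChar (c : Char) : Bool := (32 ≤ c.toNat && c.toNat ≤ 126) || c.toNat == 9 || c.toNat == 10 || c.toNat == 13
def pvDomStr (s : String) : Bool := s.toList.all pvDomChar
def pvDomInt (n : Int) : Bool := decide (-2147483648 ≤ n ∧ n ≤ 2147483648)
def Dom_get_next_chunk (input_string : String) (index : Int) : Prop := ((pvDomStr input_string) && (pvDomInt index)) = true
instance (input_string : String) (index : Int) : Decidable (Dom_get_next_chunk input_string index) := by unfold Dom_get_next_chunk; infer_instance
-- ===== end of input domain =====

-- B replaces A's descending scan over all prefix lengths by a single pass over the fixed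
-- reserved-word set keeping the longest word matching at the index (idiomatic; same cost class).

-- shared helper: the whitespace-skip loop, identical in both Pythons
-- ('while index < len(s) and s[index].isspace(): index += 1'); pyGet? is none exactly where
-- Python's s[index] would raise (index < -len, outside Pre_), and the loop stops there.
def pvSkipWS (s : List Char) (i : Int) : Int :=
  if _h : i < (s.length : Int) then
    match PySem.List.pyGet? s i with
    | some c => if PySem.Chars.isspace c then pvSkipWS s (i + 1) else i
    | none => i
  else i
termination_by (s.length - i).toNat
decreasing_by omega

-- ===== PORT A =====
def pvReserved : PySem.Set String :=
  PySem.Set.ofList ["program", "end", "var", "begin", "integer", "print", "LB"]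

-- the 'for length in range(len(input_string) - index, 0, -1)' loop with its fallback return
def pvScanA (s : List Char) (i : Int) : List Int → String × Int
  | [] => (match PySem.List.pyGet? s i with | some c => String.ofList [c] | none => "", i + 1)
  | L :: rest =>
      let chunk := PySem.List.slice s (some i) (some (i + L))
      if String.ofList chunk ∈ pvReserved then (String.ofList chunk, i + L)
      else pvScanA s i rest

def get_next_chunk (input_string : String) (index : Int) : String × Int :=
  let s := input_string.toList
  let i := pvSkipWS s index
  if (s.length : Int) ≤ i then ("$", i)
  else if PySem.Chars.startswith (PySem.List.slice s (some i) none) ("\"value=\",".toList) then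
    ("\"value=\",", i + 9)
  else pvScanA s i (PySem.List.pyRange ((s.length : Int) - i) 0 (-1))

-- ===== PORT B =====
def pvReservedWords : List String := ["program", "end", "var", "begin", "integer", "print", "LB"]

-- 'best = None; for word in reserved_words: if startswith(word, index) and longer: best = word'
def pvBest (s : List Char) (i : Int) : Option String :=
  pvReservedWords.foldl
    (fun best w =>
      if PySem.Chars.startswith (PySem.List.slice s (some i) none) w.toList then
        match best with
        | none => some w
        | some b => if PySem.Str.len b < PySem.Str.len w then some w else best
      else best)
    none

def get_next_chunk_alt (input_string : String) (index : Int) : String × Int :=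
  let s := input_string.toList
  let i := pvSkipWS s index
  if (s.length : Int) ≤ i then ("$", i)
  else if PySem.Chars.startswith (PySem.List.slice s (some i) none) ("\"value=\",".toList) then
    ("\"value=\",", i + 9)
  else
    match pvBest s i with
    | some w => (w, i + PySem.Str.len w)
    | none => (match PySem.List.pyGet? s i with | some c => String.ofList [c] | none => "", i + 1)

-- ===== PRECONDITION & SPEC =====
-- Pre_ excludes negative indices: they are outside a tokenizer's natural domain — Python's
-- negative-index wraparound makes A's slice arithmetic return accidental offsets there
-- (e.g. on ("xxvar", -3)), and A raises IndexError for index < -len(input_string).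
def Pre_get_next_chunk (input_string : String) (index : Int) : Prop := 0 ≤ index
instance (input_string : String) (index : Int) : Decidable (Pre_get_next_chunk input_string index) := by
  unfold Pre_get_next_chunk; infer_instance

def pvWitness_get_next_chunk : String × Int := ("  var x", 0)

def Spec_get_next_chunk (input_string : String) (index : Int) (out : String × Int) : Prop :=
  out = get_next_chunk_alt input_string index
instance (input_string : String) (index : Int) (out : String × Int) :
    Decidable (Spec_get_next_chunk input_string index out) := by
  unfold Spec_get_next_chunk; infer_instance

-- ===== CLAIM (what is proved, stated in full; the proofs are below) =====
def Claim_equal_get_next_chunk : Prop :=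
  ∀ (input_string : String) (index : Int), Dom_get_next_chunk input_string index →
    Pre_get_next_chunk input_string index →
    Spec_get_next_chunk input_string index (get_next_chunk input_string index)

-- ===== LEMMAS AND PROOFS =====

lemma pvSkipWS_ge (s : List Char) (i : Int) : i ≤ pvSkipWS s i := by
  fun_induction pvSkipWS s i <;> omega

-- no reserved word is a prefix of a different one
lemma pvWords_prefix_eq : ∀ w1 ∈ pvReservedWords, ∀ w2 ∈ pvReservedWords,
    w1.toList <+: w2.toList → w1 = w2 := by decide

lemma pvPrefix_unique {t : List Char} {w1 w2 : String}
    (h1 : w1 ∈ pvReservedWords) (h2 : w2 ∈ pvReservedWords)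
    (p1 : w1.toList <+: t) (p2 : w2.toList <+: t) : w1 = w2 := by
  rcases le_total w1.toList.length w2.toList.length with h | h
  · exact pvWords_prefix_eq w1 h1 w2 h2 (List.prefix_of_prefix_length_le p1 p2 h)
  · exact (pvWords_prefix_eq w2 h2 w1 h1 (List.prefix_of_prefix_length_le p2 p1 h)).symm

lemma pvMem_reserved_iff (x : String) : x ∈ pvReserved ↔ x ∈ pvReservedWords := by
  simp [pvReserved, pvReservedWords, PySem.Set.ofList]

lemma pvScanA_no_match (s : List Char) (i : Int) (Ls : List Int)
    (h : ∀ L ∈ Ls, String.ofList (PySem.List.slice s (some i) (some (i + L))) ∉ pvReserved) :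
    pvScanA s i Ls =
      (match PySem.List.pyGet? s i with | some c => String.ofList [c] | none => "", i + 1) := by
  induction Ls with
  | nil => rfl
  | cons L rest ih =>
      simp only [pvScanA]
      rw [if_neg (h L (by simp))]
      exact ih (fun L' hL' => h L' (by simp [hL']))

lemma pvScanA_hit (s : List Char) (i ℓ : Int) (h1 : 1 ≤ ℓ)
    (hm : String.ofList (PySem.List.slice s (some i) (some (i + ℓ))) ∈ pvReserved) :
    ∀ k : Nat, ∀ n : Int, n = ℓ + k →
      (∀ L, ℓ < L → L ≤ n →
        String.ofList (PySem.List.slice s (some i) (some (i + L))) ∉ pvReserved) →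
      pvScanA s i (PySem.List.pyRange n 0 (-1)) =
        (String.ofList (PySem.List.slice s (some i) (some (i + ℓ))), i + ℓ) := by
  intro k
  induction k with
  | zero =>
      intro n hn _
      have hn' : n = ℓ := by omega
      subst hn'
      rw [PySem.List.pyRange_neg_one_cons (by omega)]
      simp only [pvScanA]
      rw [if_pos (by simpa using hm)]
  | succ k ih =>
      intro n hn hno
      rw [PySem.List.pyRange_neg_one_cons (by omega)]
      simp only [pvScanA]
      rw [if_neg (hno n (by omega) (by omega))]
      exact ih (n - 1) (by omega) (fun L hL1 hL2 => hno L hL1 (by omega))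

-- B's fold keeps 'some w' once it holds it, when every other word fails the prefix test
lemma pvBest_keep (t : List Char) (w : String)
    (f : Option String → String → Option String)
    (hf : f = fun best w' =>
      if PySem.Chars.startswith t w'.toList then
        match best with
        | none => some w'
        | some b => if PySem.Str.len b < PySem.Str.len w' then some w' else best
      else best) :
    ∀ W : List String, (∀ w' ∈ W, w' ≠ w → PySem.Chars.startswith t w'.toList = false) →
      W.foldl f (some w) = some w := by
  intro W
  induction W with
  | nil => intro _; rfl
  | cons w' rest ih =>
      intro hW
      have hstep : f (some w) w' = some w := by
        by_cases he : w' = w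
        · subst he
          simp only [hf]
          split
          · simp
          · rfl
        · simp only [hf, hW w' (by simp) he, Bool.false_eq_true, if_false]
      simp only [List.foldl_cons, hstep]
      exact ih (fun w'' hw'' => hW w'' (by simp [hw'']))

-- B's fold finds the unique matching word
lemma pvBest_find (t : List Char) (w : String)
    (f : Option String → String → Option String)
    (hf : f = fun best w' =>
      if PySem.Chars.startswith t w'.toList then
        match best with
        | none => some w'
        | some b => if PySem.Str.len b < PySem.Str.len w' then some w' else best
      else best)
    (htrue : PySem.Chars.startswith t w.toList = true) :
    ∀ W : List String, w ∈ W → (∀ w' ∈ W, w' ≠ w → PySem.Chars.startswith t w'.toList = false) →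
      W.foldl f none = some w := by
  intro W
  induction W with
  | nil => intro h; exact absurd h (by simp)
  | cons w' rest ih =>
      intro hmem hW
      by_cases he : w' = w
      · subst he
        have hstep : f none w' = some w' := by simp only [hf, htrue, if_true]
        simp only [List.foldl_cons, hstep]
        exact pvBest_keep t w' f hf rest (fun w'' hw'' => hW w'' (by simp [hw'']))
      · have hstep : f none w' = none := by
          simp only [hf, hW w' (by simp) he, Bool.false_eq_true, if_false]
        simp only [List.foldl_cons, hstep]
        exact ih (by rcases List.mem_cons.mp hmem with h | h; exact absurd h.symm he; exact h)
            (fun w'' hw'' => hW w'' (by simp [hw'']))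

lemma pvBranch_eq (s : List Char) (i : Int) (h0 : 0 ≤ i) (hl : i < (s.length : Int)) :
    pvScanA s i (PySem.List.pyRange ((s.length : Int) - i) 0 (-1)) =
      (match pvBest s i with
       | some w => (w, i + PySem.Str.len w)
       | none => (match PySem.List.pyGet? s i with | some c => String.ofList [c] | none => "", i + 1)) := by
  have hsl : PySem.List.slice s (some i) none = s.drop i.toNat := PySem.List.slice_from s h0
  set t := s.drop i.toNat with ht
  have htlen : (t.length : Int) = (s.length : Int) - i := by
    simp only [ht, List.length_drop]
    omega
  have hslice : ∀ L : Int, 0 ≤ L →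
      PySem.List.slice s (some i) (some (i + L)) = t.take L.toNat := by
    intro L hL
    rw [PySem.List.slice_toNat s h0 (by omega)]
    rw [← ht]
    congr 1
    omega
  by_cases hex : ∃ w ∈ pvReservedWords, w.toList <+: t
  · obtain ⟨w, hwW, hwp⟩ := hex
    have huniq : ∀ w' ∈ pvReservedWords, w'.toList <+: t → w' = w :=
      fun w' h' p' => pvPrefix_unique h' hwW p' hwp
    have hwlen1 : 1 ≤ w.toList.length := by fin_cases hwW <;> decide
    have hwle : w.toList.length ≤ t.length := hwp.length_le
    have htake : t.take w.toList.length = w.toList := (List.prefix_iff_eq_take.mp hwp).symm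
    -- A side: the unique matching length is w.toList.length
    have hm : String.ofList (PySem.List.slice s (some i) (some (i + (w.toList.length : Int)))) ∈ pvReserved := by
      rw [hslice _ (by positivity), Int.toNat_natCast, htake]
      simpa [pvMem_reserved_iff] using hwW
    have hno : ∀ L, (w.toList.length : Int) < L → L ≤ (s.length : Int) - i →
        String.ofList (PySem.List.slice s (some i) (some (i + L))) ∉ pvReserved := by
      intro L hL1 hL2 hmem
      rw [hslice L (by omega), pvMem_reserved_iff] at hmem
      have hp' : (String.ofList (t.take L.toNat)).toList <+: t := by
        rw [String.toList_ofList]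
        exact List.take_prefix _ _
      have heqw := huniq _ hmem hp'
      have hLt : L.toNat ≤ t.length := by omega
      have hlen : (String.ofList (t.take L.toNat)).toList.length = L.toNat := by
        rw [String.toList_ofList, List.length_take]
        omega
      rw [heqw] at hlen
      omega
    have hA := pvScanA_hit s i (w.toList.length) (by exact_mod_cast hwlen1) hm
      ((s.length : Int) - i - w.toList.length).toNat ((s.length : Int) - i) (by omega) hno
    rw [hA]
    -- B side: the fold returns some w
    have hsw : ∀ w' : String, PySem.Chars.startswith t w'.toList = true ↔ w'.toList <+: t :=
      fun w' => PySem.Chars.startswith_iff t w'.toList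
    have hfalse : ∀ w' ∈ pvReservedWords, w' ≠ w → PySem.Chars.startswith t w'.toList = false := by
      intro w' hW' hne
      cases hc : PySem.Chars.startswith t w'.toList
      · rfl
      · exact absurd (huniq w' hW' ((hsw w').mp hc)) hne
    have hB : pvBest s i = some w := by
      unfold pvBest
      rw [hsl]
      exact pvBest_find t w _ rfl ((hsw w).mpr hwp) pvReservedWords hwW hfalse
    rw [hB]
    rw [hslice _ (by positivity), Int.toNat_natCast, htake]
    simp [PySem.Str.len]
  · -- no reserved word matches: A falls through the whole range, B's fold stays none
    simp only [not_exists, not_and] at hex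
    have hno : ∀ L ∈ PySem.List.pyRange ((s.length : Int) - i) 0 (-1),
        String.ofList (PySem.List.slice s (some i) (some (i + L))) ∉ pvReserved := by
      intro L hL hmem
      rw [PySem.List.mem_pyRange_neg_one] at hL
      rw [hslice L (by omega), pvMem_reserved_iff] at hmem
      exact hex _ hmem (by rw [String.toList_ofList]; exact List.take_prefix _ _)
    rw [pvScanA_no_match s i _ hno]
    have hB : pvBest s i = none := by
      unfold pvBest
      rw [hsl]
      have hfalse : ∀ w' ∈ pvReservedWords, PySem.Chars.startswith t w'.toList = false := by
        intro w' hW'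
        cases hc : PySem.Chars.startswith t w'.toList
        · rfl
        · exact absurd ((PySem.Chars.startswith_iff t w'.toList).mp hc) (hex w' hW')
      simp only [pvReservedWords, List.foldl_cons, List.foldl_nil,
        hfalse "program" (by simp [pvReservedWords]), hfalse "end" (by simp [pvReservedWords]),
        hfalse "var" (by simp [pvReservedWords]), hfalse "begin" (by simp [pvReservedWords]),
        hfalse "integer" (by simp [pvReservedWords]), hfalse "print" (by simp [pvReservedWords]),
        hfalse "LB" (by simp [pvReservedWords]), Bool.false_eq_true, if_false]
    rw [hB]

-- ===== VERDICT (by name: the statement is the Claim_ definition above) =====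
theorem get_next_chunk_spec : Claim_equal_get_next_chunk := by
  intro input_string index _ hpre
  unfold Spec_get_next_chunk get_next_chunk get_next_chunk_alt
  generalize input_string.toList = s
  dsimp only
  have h0 : 0 ≤ pvSkipWS s index := le_trans hpre (pvSkipWS_ge s index)
  set i := pvSkipWS s index with hi
  split_ifs with hend hv
  · rfl
  · rfl
  · exact pvBranch_eq s i h0 (by omega)
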